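-- pv_equiv track=rewrite | github.com/Aniket886/password_toolkit | src/security_analyzer.py | _get_character_space
-- ===== SOURCE A (Python) =====
-- import string
--
-- def _get_character_space(password: str) -> int:
--     """
--     Determine the character space used in password.
--
--     Args:
--         password: Password to analyze
--
--     Returns:
--         Size of character space
--     """
--     space = 0
--
--     if any(c in string.ascii_lowercase for c in password):
--         space += 26
--     if any(c in string.ascii_uppercase for c in password):
--         space += 26
--     if any(c in string.digits for c in password):
--         space += 10
--     if any(c in string.punctuation for c in password):
--         space += len(string.punctuation)
--
--     return space
-- ===== SOURCE B (Python) =====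
-- import string
--
--
-- def _get_character_space(password: str) -> int:
--     # One pass over the password maintaining "class seen" flags instead of
--     # four separate any(...) scans.
--     has_lower = False
--     has_upper = False
--     has_digit = False
--     has_punct = False
--     for c in password:
--         if c in string.ascii_lowercase:
--             has_lower = True
--         if c in string.ascii_uppercase:
--             has_upper = True
--         if c in string.digits:
--             has_digit = True
--         if c in string.punctuation:
--             has_punct = True
--     return ((26 if has_lower else 0)
--             + (26 if has_upper else 0)
--             + (10 if has_digit else 0)
--             + (len(string.punctuation) if has_punct else 0))
-- ===== Notes on version B (the rewrite author's own statement) =====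
-- stated objective: faster
-- what changed: Replaces four separate any(...) scans of the password with one pass that maintains four class-seen flags and sums the fixed weights at the end.
import Mathlib
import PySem

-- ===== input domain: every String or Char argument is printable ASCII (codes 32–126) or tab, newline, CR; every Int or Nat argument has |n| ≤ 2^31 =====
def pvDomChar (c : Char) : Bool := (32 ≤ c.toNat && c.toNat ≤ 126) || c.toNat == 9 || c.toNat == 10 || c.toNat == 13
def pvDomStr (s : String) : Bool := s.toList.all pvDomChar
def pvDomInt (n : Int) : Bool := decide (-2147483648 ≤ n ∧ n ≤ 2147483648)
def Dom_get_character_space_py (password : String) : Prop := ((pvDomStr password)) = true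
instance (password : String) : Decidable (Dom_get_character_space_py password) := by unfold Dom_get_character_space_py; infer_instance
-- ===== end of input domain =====

-- B replaces A's four separate any(...) scans by a single pass keeping four class-seen flags (objective: faster by a constant factor).

-- ===== PORT A =====
-- string.ascii_lowercase / ascii_uppercase / digits / punctuation, as character lists
def pvLowerChars : List Char := "abcdefghijklmnopqrstuvwxyz".toList
def pvUpperChars : List Char := "ABCDEFGHIJKLMNOPQRSTUVWXYZ".toList
def pvDigitChars : List Char := "0123456789".toList
def pvPunctChars : List Char := "!\"#$%&'()*+,-./:;<=>?@[\\]^_`{|}~".toList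

def get_character_space_py (password : String) : Int :=
  let cs := password.toList
  let space : Int := 0
  let space := if cs.any (fun c => pvLowerChars.contains c) then space + 26 else space
  let space := if cs.any (fun c => pvUpperChars.contains c) then space + 26 else space
  let space := if cs.any (fun c => pvDigitChars.contains c) then space + 10 else space
  let space := if cs.any (fun c => pvPunctChars.contains c) then space + (pvPunctChars.length : Int) else space
  space

-- ===== PORT B =====
-- one fold over the characters maintaining (has_lower, has_upper, has_digit, has_punct)
def pvStepB (s : Bool × Bool × Bool × Bool) (c : Char) : Bool × Bool × Bool × Bool :=
  let s := if pvLowerChars.contains c then (true, s.2.1, s.2.2.1, s.2.2.2) else s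
  let s := if pvUpperChars.contains c then (s.1, true, s.2.2.1, s.2.2.2) else s
  let s := if pvDigitChars.contains c then (s.1, s.2.1, true, s.2.2.2) else s
  let s := if pvPunctChars.contains c then (s.1, s.2.1, s.2.2.1, true) else s
  s

def get_character_space_py_alt (password : String) : Int :=
  let f := password.toList.foldl pvStepB (false, false, false, false)
  (if f.1 then (26 : Int) else 0) + (if f.2.1 then (26 : Int) else 0)
    + (if f.2.2.1 then (10 : Int) else 0)
    + (if f.2.2.2 then (pvPunctChars.length : Int) else 0)

-- ===== PRECONDITION & SPEC =====
def Spec_get_character_space_py (password : String) (out : Int) : Prop := out = get_character_space_py_alt password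
instance (password : String) (out : Int) : Decidable (Spec_get_character_space_py password out) := by unfold Spec_get_character_space_py; infer_instance

-- ===== CLAIM (what is proved, stated in full; the proofs are below) =====
def Claim_equal_get_character_space_py : Prop := ∀ (password : String), Dom_get_character_space_py password → Spec_get_character_space_py password (get_character_space_py password)

-- ===== LEMMAS AND PROOFS =====

-- one step of the fold just or-s the four class tests into the flags
theorem pvStepB_apply (l u d p : Bool) (c : Char) :
    pvStepB (l, u, d, p) c
      = (l || pvLowerChars.contains c, u || pvUpperChars.contains c,
         d || pvDigitChars.contains c, p || pvPunctChars.contains c) := by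
  unfold pvStepB
  cases h1 : pvLowerChars.contains c <;>
    cases h2 : pvUpperChars.contains c <;>
      cases h3 : pvDigitChars.contains c <;>
        cases h4 : pvPunctChars.contains c <;>
          simp

-- the fold computes exactly the four any-scans, folded into the incoming flags
theorem pvFoldB_eq (cs : List Char) : ∀ (l u d p : Bool),
    cs.foldl pvStepB (l, u, d, p)
      = (l || cs.any (fun c => pvLowerChars.contains c),
         u || cs.any (fun c => pvUpperChars.contains c),
         d || cs.any (fun c => pvDigitChars.contains c),
         p || cs.any (fun c => pvPunctChars.contains c)) := by
  induction cs with
  | nil => intro l u d p; simp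
  | cons c cs ih =>
      intro l u d p
      rw [List.foldl_cons, pvStepB_apply, ih]
      simp [Bool.or_assoc]

-- ===== VERDICT (by name: the statement is the Claim_ definition above) =====
theorem get_character_space_py_spec : Claim_equal_get_character_space_py := by
  intro password _
  unfold Spec_get_character_space_py get_character_space_py get_character_space_py_alt
  rw [pvFoldB_eq]
  simp only [Bool.false_or]
  generalize (pvPunctChars.length : Int) = n
  generalize password.toList.any (fun c => pvLowerChars.contains c) = a
  generalize password.toList.any (fun c => pvUpperChars.contains c) = b
  generalize password.toList.any (fun c => pvDigitChars.contains c) = d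
  generalize password.toList.any (fun c => pvPunctChars.contains c) = p
  cases a <;> cases b <;> cases d <;> cases p <;> simp <;> ring
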